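-- pv_equiv track=rewrite | github.com/hoonseojung/cote | programmers/split_string.py | solution
-- ===== SOURCE A (Python) =====
-- def solution(s):
--     tmp = ""
--     check = 0
--     answer = 0
--     dic = dict()
--     if len(s) == 1: # 길이가 1이면 바로 1 return
--         return 1
--     for i, ss in enumerate(s): # 문자 한 개씩 돌며
--         if ss not in dic: # 나온적이 없다면 딕셔너리에 추가
--             dic[ss] = 1
--         else: # 나온적이 있다면 횟수 +1
--             dic[ss] += 1
--         tmp += ss # 현재까지 읽은 문자열
--         x = tmp[0] # 현재까지 읽은 문자열의 첫번째 글자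
--         for d in dic: # 딕셔너리를 돌며
--             if d != x: # 첫 번째 글자가 아닌 다른 글자들에 대해서
--                 check += dic[d] # 나온 횟수 카운트
--         if check == dic[x]: # 카운트가 첫 번째 글자가 나온 횟수와 같다면
--             answer += 1 # answer += 1
--             tmp = "" # tmp 초기화
--             dic = dict() # 딕셔너리 초기화
--         check = 0 # 횟수가 같던 같지 않던 카운트 초기화
--         if i == len(s)-1 and tmp != "": # 횟수가 다른 상태에서 더 이상 읽을 글자가 없다면
--             answer += 1 # 마지막 문자열 분리하기에 answer += 1
--     return answer
-- ===== SOURCE B (Python) =====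
-- def solution(s):
--     answer = 0
--     i = 0
--     n = len(s)
--     while i < n:
--         first = s[i]
--         bal = 0
--         while i < n:
--             bal += 1 if s[i] == first else -1
--             i += 1
--             if bal == 0:
--                 break
--         answer += 1
--     return answer
-- ===== Notes on version B (the rewrite author's own statement) =====
-- stated objective: faster
-- what changed: A makes one linear pass carrying a per-character count dictionary that it re-sums at every position; B is an outer loop over segments whose inner loop locates each split point with a single signed balance counter (+1 for the segment's first character, -1 otherwise), with no dictionary and no accumulated state across segments.
import Mathlib
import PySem

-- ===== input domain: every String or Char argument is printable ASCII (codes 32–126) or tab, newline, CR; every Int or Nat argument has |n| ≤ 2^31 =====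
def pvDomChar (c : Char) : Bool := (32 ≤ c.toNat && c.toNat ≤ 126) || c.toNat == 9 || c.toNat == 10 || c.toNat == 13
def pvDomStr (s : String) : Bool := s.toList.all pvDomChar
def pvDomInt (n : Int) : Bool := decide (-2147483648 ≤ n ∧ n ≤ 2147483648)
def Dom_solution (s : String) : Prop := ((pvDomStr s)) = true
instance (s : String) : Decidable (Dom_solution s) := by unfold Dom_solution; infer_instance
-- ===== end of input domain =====

-- B replaces A's single pass with a per-character count dictionary (re-summed at every
-- position) by an outer loop over segments whose inner loop finds each split point with
-- one signed balance counter; same return value on every input.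

-- ===== PORT A =====
-- one loop iteration of A (state: tmp, check, answer, dic); n = len(s)
def aStep (n : Int) (st : List Char × Int × Int × PySem.Dict Char Int) (p : Int × Char) :
    List Char × Int × Int × PySem.Dict Char Int :=
  let tmp := st.1
  let check := st.2.1
  let answer := st.2.2.1
  let dic := st.2.2.2
  -- if ss not in dic: dic[ss] = 1 else: dic[ss] += 1
  let dic := if dic.contains p.2 then dic.insert p.2 (dic.getD p.2 0 + 1) else dic.insert p.2 1
  -- tmp += ss
  let tmp := tmp ++ [p.2]
  -- x = tmp[0]  (tmp just received a character, so the index never raises)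
  let x := PySem.List.pyGetD tmp 0 ' '
  -- for d in dic: if d != x: check += dic[d]
  let check := dic.keys.foldl (fun acc d => if d ≠ x then acc + dic.getD d 0 else acc) check
  -- if check == dic[x]: answer += 1; tmp = ""; dic = dict()   (x is a key of dic, so dic[x] never raises)
  let (answer, tmp, dic) :=
    if check = dic.getD x 0 then (answer + 1, ([] : List Char), (PySem.Dict.empty : PySem.Dict Char Int))
    else (answer, tmp, dic)
  -- check = 0
  let check := (0 : Int)
  -- if i == len(s)-1 and tmp != "": answer += 1
  let answer := if p.1 = n - 1 ∧ tmp ≠ [] then answer + 1 else answer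
  (tmp, check, answer, dic)

def solution (s : String) : Int :=
  if PySem.Str.len s = 1 then 1
  else
    ((PySem.List.enumerate s.toList 0).foldl (aStep (PySem.Str.len s))
      ([], 0, 0, PySem.Dict.empty)).2.2.1

-- ===== PORT B =====
-- B's inner while loop: advance through the suffix, bal += ±1, stop when bal hits 0;
-- returns the unread suffix (empty both when the loop breaks at the end and when it runs out)
def bInner (first : Char) (bal : Int) : List Char → List Char
  | [] => []
  | c :: t =>
    let bal := bal + (if c = first then 1 else -1)
    if bal = 0 then t else bInner first bal t

-- the inner loop reads at least the characters it is given back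
lemma bInner_length_le (first : Char) (bal : Int) (l : List Char) :
    (bInner first bal l).length ≤ l.length := by
  induction l generalizing bal with
  | nil => simp [bInner]
  | cons c t ih =>
    simp only [bInner]
    split <;> split <;> first
      | exact Nat.le_succ _
      | exact le_trans (ih _) (Nat.le_succ _)

-- B's outer while loop: one iteration per segment
def bOuter : List Char → Int → Int
  | [], answer => answer
  | c :: t, answer => bOuter (bInner c 0 (c :: t)) (answer + 1)
termination_by l => l.length
decreasing_by
  simp only [bInner]
  rw [if_neg (by norm_num)]
  exact Nat.lt_succ_of_le (bInner_length_le _ _ _)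

def solution_alt (s : String) : Int := bOuter s.toList 0

-- ===== PRECONDITION & SPEC =====
def Spec_solution (s : String) (out : Int) : Prop := out = solution_alt s
instance (s : String) (out : Int) : Decidable (Spec_solution s out) := by unfold Spec_solution; infer_instance

-- ===== CLAIM (what is proved, stated in full; the proofs are below) =====
def Claim_equal_solution : Prop := ∀ (s : String), Dom_solution s → Spec_solution s (solution s)

-- ===== LEMMAS AND PROOFS =====

-- proof-side middle layer: A's linear pass compressed to two counters (same/diff) per segment
def bStep (st : Int × Int × Int × Char) (c : Char) : Int × Int × Int × Char :=
  let answer := st.1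
  let same := st.2.1
  let diff := st.2.2.1
  let first := st.2.2.2
  let (first, same, diff) :=
    if same = 0 then (c, (1 : Int), diff)
    else if c = first then (first, same + 1, diff)
    else (first, same, diff + 1)
  if same = diff then (answer + 1, 0, 0, first) else (answer, same, diff, first)

def bPost (st : Int × Int × Int × Char) : Int :=
  if st.2.1 + st.2.2.1 > 0 then st.1 + 1 else st.1

-- A's dict update is exactly the Counter step
lemma dic_update_eq_modify (d : PySem.Dict Char Int) (c : Char) :
    (if d.contains c then d.insert c (d.getD c 0 + 1) else d.insert c 1) =
      d.modify c 0 (· + 1) := by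
  have hmod : d.modify c 0 (· + 1) = d.insert c (d.getD c 0 + 1) :=
    (PySem.Dict.ext_iff.mpr rfl).symm
  by_cases h : d.contains c = true
  · rw [if_pos h, hmod]
  · rw [if_neg h, hmod, PySem.Dict.getD_of_not_contains _ _ (by simpa using h)]
    norm_num

-- summing f over a nodup list with the entry at x zeroed out
lemma sum_if_ne (K : List Char) (f : Char → Int) (x : Char) (hK : K.Nodup) (hx : x ∈ K) :
    (K.map (fun d => if d ≠ x then f d else 0)).sum = (K.map f).sum - f x := by
  induction K with
  | nil => simp at hx
  | cons b L ih =>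
    rcases List.mem_cons.mp hx with rfl | h
    · have hall : ∀ d ∈ L, (if d ≠ x then f d else 0) = f d := by
        intro d hd
        have hne : d ≠ x := fun he => (List.nodup_cons.mp hK).1 (he ▸ hd)
        simp [hne]
      rw [List.map_cons, List.map_congr_left hall]
      simp
    · have hb : b ≠ x := fun he => (List.nodup_cons.mp hK).1 (he ▸ h)
      simp only [List.map_cons, List.sum_cons, if_pos hb, ih (List.nodup_cons.mp hK).2 h]
      ring

-- the counts of the distinct elements of l sum to its length
lemma sum_counts (l : List Char) :
    ((PySem.Set.ofList l).map (fun d => (l.count d : Int))).sum = (l.length : Int) := by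
  have hperm : List.Perm (PySem.Set.ofList l) l.dedup :=
    (List.perm_ext_iff_of_nodup (PySem.Set.nodup_ofList l) l.nodup_dedup).mpr
      (fun a => by simp [PySem.Set.mem_ofList, List.mem_dedup])
  rw [List.Perm.sum_eq (hperm.map _)]
  have hlen := List.sum_map_count_dedup_eq_length l
  have hcast : (List.map (fun d => ((l.count d : Nat) : Int)) l.dedup).sum =
      ((List.map (fun d => l.count d) l.dedup).sum : Int) := by
    induction l.dedup with
    | nil => simp
    | cons a t ih => simp [ih]
  rw [hcast, hlen]

-- A's inner loop over the counter of l computes len(l) - count(x)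
lemma check_val (l : List Char) (x : Char) (hx : x ∈ l) :
    (PySem.Dict.counter l).keys.foldl
        (fun acc d => if d ≠ x then acc + (PySem.Dict.counter l).getD d 0 else acc) 0 =
      (l.length : Int) - l.count x := by
  have hfun : (fun (acc : Int) d => if d ≠ x then acc + (PySem.Dict.counter l).getD d 0 else acc)
      = (fun (acc : Int) d => acc + (if d ≠ x then (l.count d : Int) else 0)) := by
    funext acc d
    by_cases h : d ≠ x <;> simp [h, PySem.Dict.getD_counter]
  rw [hfun, PySem.List.foldl_add, PySem.Dict.keys_counter,
      sum_if_ne _ _ x (PySem.Set.nodup_ofList l) ((PySem.Set.mem_ofList l x).mpr hx),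
      sum_counts]
  ring

-- one A step from a coherent state, expressed on tmp alone
lemma aStep_eq (n i ans : Int) (tmp : List Char) (c : Char) :
    aStep n (tmp, 0, ans, PySem.Dict.counter tmp) (i, c) =
      (if ((tmp ++ [c]).length : Int) - (tmp ++ [c]).count ((tmp ++ [c]).headD ' ')
          = ((tmp ++ [c]).count ((tmp ++ [c]).headD ' ') : Int) then
        ([], 0, ans + 1, PySem.Dict.empty)
      else
        (tmp ++ [c], 0, (if i = n - 1 then ans + 1 else ans), PySem.Dict.counter (tmp ++ [c]))) := by
  have hx : (tmp ++ [c]).headD ' ' ∈ tmp ++ [c] := by cases tmp <;> simp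
  have hget : PySem.List.pyGetD (tmp ++ [c]) 0 ' ' = (tmp ++ [c]).headD ' ' := by
    cases tmp <;> simp [PySem.List.pyGetD_zero]
  unfold aStep
  simp only
  rw [show (if (PySem.Dict.counter tmp).contains c
        then (PySem.Dict.counter tmp).insert c ((PySem.Dict.counter tmp).getD c 0 + 1)
        else (PySem.Dict.counter tmp).insert c 1) = PySem.Dict.counter (tmp ++ [c]) from by
    rw [dic_update_eq_modify, PySem.Dict.counter_append_singleton]]
  rw [hget, check_val (tmp ++ [c]) _ hx, PySem.Dict.getD_counter]
  split_ifs <;> simp_all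

-- one bStep from a coherent state, expressed on tmp alone
lemma bStep_eq (ans : Int) (tmp : List Char) (first c : Char) :
    bStep (ans, (tmp.count (tmp.headD first) : Int),
        (tmp.length : Int) - tmp.count (tmp.headD first), tmp.headD first) c =
      (if ((tmp ++ [c]).length : Int) - (tmp ++ [c]).count ((tmp ++ [c]).headD first)
          = ((tmp ++ [c]).count ((tmp ++ [c]).headD first) : Int) then
        (ans + 1, 0, 0, (tmp ++ [c]).headD first)
      else
        (ans, ((tmp ++ [c]).count ((tmp ++ [c]).headD first) : Int),
          ((tmp ++ [c]).length : Int) - (tmp ++ [c]).count ((tmp ++ [c]).headD first),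
          (tmp ++ [c]).headD first)) := by
  cases tmp with
  | nil =>
    simp only [bStep]
    norm_num
  | cons a0 t =>
    have hpos : 0 < (a0 :: t).count a0 := List.count_pos_iff.mpr (by simp)
    have hhead : ((a0 :: t) ++ [c]).headD first = a0 := rfl
    have hhead0 : (a0 :: t).headD first = a0 := rfl
    have hlen : ((a0 :: t) ++ [c]).length = (a0 :: t).length + 1 := by simp
    simp only [bStep, hhead, hhead0, hlen]
    rw [if_neg (show ¬(((a0 :: t).count a0 : Int) = 0) from by exact_mod_cast hpos.ne')]
    by_cases hc : c = a0
    · have hcnt : ((a0 :: t) ++ [c]).count a0 = (a0 :: t).count a0 + 1 := by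
        simp [List.count_append, hc]
      rw [hcnt, if_pos hc]
      simp only
      by_cases hP : ((a0 :: t).count a0 : Int) + 1 = ((a0 :: t).length : Int) - (a0 :: t).count a0
      · rw [if_pos hP, if_pos (show ((((a0 :: t).length + 1 : Nat)) : Int)
            - (((a0 :: t).count a0 + 1 : Nat) : Int) = (((a0 :: t).count a0 + 1 : Nat) : Int)
            from by push_cast at hP ⊢; omega)]
      · rw [if_neg hP, if_neg (show ¬(((((a0 :: t).length + 1 : Nat)) : Int)
            - (((a0 :: t).count a0 + 1 : Nat) : Int) = (((a0 :: t).count a0 + 1 : Nat) : Int))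
            from by push_cast at hP ⊢; omega)]
        simp only [Prod.mk.injEq, and_true, true_and]
        push_cast
        omega
    · have hcnt : ((a0 :: t) ++ [c]).count a0 = (a0 :: t).count a0 := by
        simp [List.count_append, hc]
      rw [hcnt, if_neg hc]
      simp only
      by_cases hP : ((a0 :: t).count a0 : Int) = ((a0 :: t).length : Int) - (a0 :: t).count a0 + 1
      · rw [if_pos hP, if_pos (show ((((a0 :: t).length + 1 : Nat)) : Int)
            - ((a0 :: t).count a0 : Int) = (((a0 :: t).count a0 : Nat) : Int)
            from by push_cast at hP ⊢; omega)]
      · rw [if_neg hP, if_neg (show ¬(((((a0 :: t).length + 1 : Nat)) : Int)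
            - ((a0 :: t).count a0 : Int) = (((a0 :: t).count a0 : Nat) : Int))
            from by push_cast at hP ⊢; omega)]
        simp only [Prod.mk.injEq, and_true, true_and]
        push_cast
        omega

-- the simulation: A's enumerate-fold against the two-counter fold, related through tmp
lemma sim (n : Int) (l : List Char) : ∀ (i : Int) (tmp : List Char) (ans : Int) (first : Char),
    i + l.length = n →
    ((PySem.List.enumerate l i).foldl (aStep n) (tmp, 0, ans, PySem.Dict.counter tmp)).2.2.1 =
      (if l = [] then ans
       else bPost (l.foldl bStep (ans, (tmp.count (tmp.headD first) : Int),
         (tmp.length : Int) - tmp.count (tmp.headD first), tmp.headD first))) := by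
  induction l with
  | nil =>
    intro i tmp ans first _
    simp [PySem.List.enumerate_nil]
  | cons c rest ih =>
    intro i tmp ans first hi
    have hd : (tmp ++ [c]).headD first = (tmp ++ [c]).headD ' ' := by cases tmp <;> simp
    rw [PySem.List.enumerate_cons, List.foldl_cons, List.foldl_cons, aStep_eq, bStep_eq, hd,
      if_neg (List.cons_ne_nil c rest)]
    by_cases hC : ((tmp ++ [c]).length : Int) - (tmp ++ [c]).count ((tmp ++ [c]).headD ' ')
        = ((tmp ++ [c]).count ((tmp ++ [c]).headD ' ') : Int)
    · rw [if_pos hC, if_pos hC]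
      rw [show (PySem.Dict.empty : PySem.Dict Char Int) = PySem.Dict.counter [] from rfl]
      rw [ih (i + 1) [] (ans + 1) ((tmp ++ [c]).headD ' ') (by push_cast [List.length_cons] at hi ⊢; omega)]
      by_cases hr : rest = []
      · subst hr
        simp [bPost]
      · rw [if_neg hr]
        norm_num
    · rw [if_neg hC, if_neg hC]
      by_cases hr : rest = []
      · subst hr
        have hi' : i = n - 1 := by simp at hi; omega
        rw [if_pos hi']
        simp only [PySem.List.enumerate_nil, List.foldl_nil, bPost]
        rw [if_pos (show ((tmp ++ [c]).count ((tmp ++ [c]).headD ' ') : Int)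
            + (((tmp ++ [c]).length : Int) - (tmp ++ [c]).count ((tmp ++ [c]).headD ' ')) > 0 from by
          have h0 : (1 : Int) ≤ ((tmp ++ [c]).length : Int) := by
            have hlen : 0 < (tmp ++ [c]).length := by simp
            exact_mod_cast hlen
          omega)]
      · have hi' : ¬ i = n - 1 := by
          have h0 : (1 : Int) ≤ (rest.length : Int) := by
            exact_mod_cast List.length_pos_iff.mpr hr
          push_cast [List.length_cons] at hi
          omega
        rw [if_neg hi']
        rw [ih (i + 1) (tmp ++ [c]) ans ' ' (by push_cast [List.length_cons] at hi ⊢; omega),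
          if_neg hr]

-- the two-counter fold, in turn, is B's segment recursion
lemma fold_eq_bOuter (l : List Char) : ∀ (ans same diff : Int) (f : Char),
    (same = 0 ∧ diff = 0) ∨ (same - diff > 0 ∧ diff ≥ 0) →
    bPost (l.foldl bStep (ans, same, diff, f)) =
      (if same = 0 ∧ diff = 0 then bOuter l ans
       else bOuter (bInner f (same - diff) l) (ans + 1)) := by
  induction l with
  | nil =>
    intro ans same diff f h
    rcases h with ⟨h1, h2⟩ | ⟨h1, h2⟩
    · simp [h1, h2, bPost, bOuter]
    · rw [if_neg (by omega)]
      simp only [List.foldl_nil, bPost, bInner, bOuter]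
      rw [if_pos (by omega)]
  | cons c t ih =>
    intro ans same diff f h
    rcases h with ⟨h1, h2⟩ | ⟨h1, h2⟩
    · subst h1; subst h2
      rw [if_pos ⟨rfl, rfl⟩, List.foldl_cons]
      have hstep : bStep (ans, 0, 0, f) c = (ans, 1, 0, c) := by
        simp [bStep]
      rw [hstep, ih ans 1 0 c (Or.inr (by omega))]
      rw [if_neg (by omega)]
      rw [show bOuter (c :: t) ans = bOuter (bInner c 0 (c :: t)) (ans + 1) from by
        rw [bOuter]]
      congr 1
      simp [bInner]
    · have hsame : ¬ same = 0 := by omega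
      rw [if_neg (by omega), List.foldl_cons]
      by_cases hc : c = f
      · have hstep : bStep (ans, same, diff, f) c =
            (if same + 1 = diff then (ans + 1, 0, 0, f) else (ans, same + 1, diff, f)) := by
          simp [bStep, hsame, hc]
        have hin : bInner f (same - diff) (c :: t) = bInner f (same + 1 - diff) t := by
          simp only [bInner, if_pos hc]
          rw [show same - diff + 1 = same + 1 - diff from by ring, if_neg (by omega)]
        have hz : ¬ same + 1 = diff := by omega
        rw [hstep, if_neg hz, hin,
          ih ans (same + 1) diff f (Or.inr (by omega)), if_neg (by omega)]
      · have hstep : bStep (ans, same, diff, f) c =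
            (if same = diff + 1 then (ans + 1, 0, 0, f) else (ans, same, diff + 1, f)) := by
          simp [bStep, hsame, hc]
        by_cases hz : same = diff + 1
        · have hin : bInner f (same - diff) (c :: t) = t := by
            simp only [bInner, if_neg hc]
            rw [show same - diff + -1 = same - (diff + 1) from by ring, if_pos (by omega)]
          rw [hstep, if_pos hz, hin,
            ih (ans + 1) 0 0 f (Or.inl ⟨rfl, rfl⟩), if_pos ⟨rfl, rfl⟩]
        · have hin : bInner f (same - diff) (c :: t) = bInner f (same - (diff + 1)) t := by
            simp only [bInner, if_neg hc]
            rw [show same - diff + -1 = same - (diff + 1) from by ring, if_neg (by omega)]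
          rw [hstep, if_neg hz, hin,
            ih ans same (diff + 1) f (Or.inr (by omega)), if_neg (by omega)]

-- ===== VERDICT (by name: the statement is the Claim_ definition above) =====
theorem solution_spec : Claim_equal_solution := by
  intro s _
  unfold Spec_solution solution solution_alt
  rw [PySem.Str.len_eq]
  cases hl : s.toList with
  | nil => simp [PySem.List.enumerate_nil, bOuter]
  | cons c rest =>
    cases rest with
    | nil =>
      rw [if_pos (by simp)]
      simp [bOuter, bInner]
    | cons c2 rest2 =>
      rw [if_neg (by simp; omega)]
      rw [show (PySem.Dict.empty : PySem.Dict Char Int) = PySem.Dict.counter [] from rfl]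
      rw [sim ((c :: c2 :: rest2).length : Int) (c :: c2 :: rest2) 0 [] 0 ' ' (by omega)]
      rw [if_neg (List.cons_ne_nil _ _)]
      simp only [List.headD_nil, List.count_nil, List.length_nil, Nat.cast_zero, sub_zero]
      rw [fold_eq_bOuter (c :: c2 :: rest2) 0 0 0 ' ' (Or.inl ⟨rfl, rfl⟩), if_pos ⟨rfl, rfl⟩]
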